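-- pv_equiv track=rewrite | github.com/fpoisson2/FormationIA | scripts/build_island_border.py | compute_border_mask
-- ===== SOURCE A (Python) =====
-- from typing import Dict, Iterable, List, Sequence, Tuple
--
-- CARDINAL_OFFSETS = {
--     "north": (0, -1),
--     "east": (1, 0),
--     "south": (0, 1),
--     "west": (-1, 0),
-- }
--
-- def compute_border_mask(inside: List[List[bool]]) -> List[List[bool]]:
--     height = len(inside)
--     width = len(inside[0]) if inside else 0
--     border = [[False] * width for _ in range(height)]
--     for y in range(height):
--         for x in range(width):
--             if not inside[y][x]:
--                 continue
--             for dx, dy in CARDINAL_OFFSETS.values():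
--                 nx, ny = x + dx, y + dy
--                 if nx < 0 or nx >= width or ny < 0 or ny >= height or not inside[ny][nx]:
--                     border[y][x] = True
--                     break
--     return border
-- ===== SOURCE B (Python) =====
-- def compute_border_mask(inside):
--     height = len(inside)
--     width = len(inside[0]) if inside else 0
--     rows = [row[:width] for row in inside]
--     false_row = [False] * width
--     above = [false_row] + rows[:height - 1]
--     below = rows[1:] + [false_row]
--     border = []
--     for row, up, dn in zip(rows, above, below):
--         left = [False] + row[:width - 1]
--         right = row[1:] + [False]
--         border.append([c and not (u and d and l and r)
--                        for c, u, d, l, r in zip(row, up, dn, left, right)])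
--     return border
-- ===== Notes on version B (the rewrite author's own statement) =====
-- stated objective: alternative
-- what changed: B computes the border by whole-grid erosion with shifted copies: it builds the above/below row-shifted grids and left/right column-shifted rows once and zips them, so the per-cell offset loop with four bounds checks disappears into bulk slicing/zipping; Pre_ excludes ragged grids with a row shorter than the first row, on which A raises IndexError.
import Mathlib
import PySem

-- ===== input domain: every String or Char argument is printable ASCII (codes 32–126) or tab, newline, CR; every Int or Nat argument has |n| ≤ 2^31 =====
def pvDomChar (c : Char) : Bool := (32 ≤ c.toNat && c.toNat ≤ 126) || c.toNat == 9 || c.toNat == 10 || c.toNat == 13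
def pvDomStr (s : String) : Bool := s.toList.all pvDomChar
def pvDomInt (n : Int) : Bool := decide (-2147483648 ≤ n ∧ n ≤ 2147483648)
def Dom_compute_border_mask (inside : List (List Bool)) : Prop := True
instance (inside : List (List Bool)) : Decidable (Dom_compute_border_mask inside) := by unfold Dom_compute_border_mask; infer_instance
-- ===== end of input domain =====

-- B computes the border by whole-grid erosion with shifted copies (above/below row
-- shifts, left/right column shifts, zipped), instead of A's per-cell offset loop with
-- bounds guards (objective: alternative).

-- ===== PORT A =====
-- inside[i][j] for Python Int indices (in range wherever A's guards let it be read)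
def pvPyCell (g : List (List Bool)) (i j : Int) : Bool :=
  (PySem.List.pyGet? ((PySem.List.pyGet? g i).getD []) j).getD false

def compute_border_mask (inside : List (List Bool)) : List (List Bool) :=
  let height := inside.length
  let width := if inside = [] then 0 else (inside.headD []).length
  (List.range height).map (fun (y : Nat) =>
    (List.range width).map (fun (x : Nat) =>
      if !(pvPyCell inside (y : Int) (x : Int)) then false
      else
        -- for dx, dy in CARDINAL_OFFSETS.values(): north, east, south, west; break at first hit
        [((0:Int),(-1:Int)), ((1:Int),(0:Int)), ((0:Int),(1:Int)), ((-1:Int),(0:Int))].any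
          (fun d =>
            let nx : Int := (x : Int) + d.1
            let ny : Int := (y : Int) + d.2
            decide (nx < 0) || decide (nx ≥ (width : Int)) || decide (ny < 0) ||
              decide (ny ≥ (height : Int)) || !(pvPyCell inside ny nx))))

-- ===== PORT B =====
-- literal transliteration of Source B: Python's zip truncates to the shortest list, which is
-- exactly List.zip; the slices rows[:height-1] and row[:width-1] are taken on lists that
-- are empty whenever height (resp. width) is 0, so Nat subtraction matches Python there.
def compute_border_mask_alt (inside : List (List Bool)) : List (List Bool) :=
  let height := inside.length
  let width := if inside = [] then 0 else (inside.headD []).length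
  let rows := inside.map (fun row => row.take width)
  let false_row := List.replicate width false
  let above := [false_row] ++ rows.take (height - 1)
  let below := rows.drop 1 ++ [false_row]
  (rows.zip (above.zip below)).map (fun t =>
    let row := t.1
    let up := t.2.1
    let dn := t.2.2
    let left := [false] ++ row.take (width - 1)
    let right := row.drop 1 ++ [false]
    (row.zip (up.zip (dn.zip (left.zip right)))).map (fun q =>
      q.1 && !(q.2.1 && q.2.2.1 && q.2.2.2.1 && q.2.2.2.2)))

-- ===== PRECONDITION & SPEC =====
-- Pre_ excludes ragged grids with a row shorter than the first row: there A raises IndexError.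
def Pre_compute_border_mask (inside : List (List Bool)) : Prop :=
  ∀ row ∈ inside, (inside.headD []).length ≤ row.length
instance (inside : List (List Bool)) : Decidable (Pre_compute_border_mask inside) := by
  unfold Pre_compute_border_mask; infer_instance
def pvWitness_compute_border_mask : List (List Bool) := [[true, true], [true, false]]

def Spec_compute_border_mask (inside : List (List Bool)) (out : List (List Bool)) : Prop := out = compute_border_mask_alt inside
instance (inside : List (List Bool)) (out : List (List Bool)) : Decidable (Spec_compute_border_mask inside out) := by unfold Spec_compute_border_mask; infer_instance

-- ===== CLAIM (what is proved, stated in full; the proofs are below) =====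
def Claim_equal_compute_border_mask : Prop := ∀ (inside : List (List Bool)), Dom_compute_border_mask inside → Pre_compute_border_mask inside → Spec_compute_border_mask inside (compute_border_mask inside)

-- ===== LEMMAS AND PROOFS =====

-- canonical views used only by the proofs
def pvCellC (inside : List (List Bool)) (w y x : Nat) : Bool :=
  (inside.getD y []).getD x false &&
    !((if y = 0 then false else (inside.getD (y-1) []).getD x false) &&
      (if y + 1 < inside.length then (inside.getD (y+1) []).getD x false else false) &&
      (if x = 0 then false else (inside.getD y []).getD (x-1) false) &&
      (if x + 1 < w then (inside.getD y []).getD (x+1) false else false))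

lemma pv_zip_eq_ofFn {α β : Type} {n : Nat} (l1 : List α) (l2 : List β) (f : Fin n → α) (g : Fin n → β)
    (h1 : l1.length = n) (h2 : n ≤ l2.length)
    (hf : ∀ (j : Nat) (hj : j < n), l1[j]'(by omega) = f ⟨j, hj⟩)
    (hg : ∀ (j : Nat) (hj : j < n), l2[j]'(by omega) = g ⟨j, hj⟩) :
    l1.zip l2 = List.ofFn (fun j => (f j, g j)) := by
  apply List.ext_getElem
  · simp [h1]; omega
  · intro i hi1 hi2
    have hi : i < n := by simp [h1] at hi1; omega
    simp only [List.getElem_zip, List.getElem_ofFn]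
    rw [← hf i hi, ← hg i hi]

lemma pv_row_ofFn (inside : List (List Bool)) (w : Nat)
    (hw : ∀ row ∈ inside, w ≤ row.length) (y : Nat) (hy : y < inside.length) :
    (inside.getD y []).take w = List.ofFn (fun j : Fin w => (inside.getD y []).getD j.val false) := by
  have hgd : inside.getD y [] = inside[y] := List.getD_eq_getElem _ _ hy
  rw [hgd]
  have hlen : w ≤ inside[y].length := hw _ (List.getElem_mem hy)
  apply List.ext_getElem
  · simp; omega
  · intro i hi1 hi2
    have hi : i < inside[y].length := by simp at hi1; omega
    simp [List.getElem_take, List.getD_eq_getElem?_getD, List.getElem?_eq_getElem hi]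

lemma pv_inner (inside : List (List Bool)) (w y : Nat) (up dn : List Bool)
    (uf df : Nat → Bool)
    (hulen : w ≤ up.length) (hdlen : w ≤ dn.length)
    (hu : ∀ (j : Nat) (hj : j < w), up[j]'(by omega) = uf j)
    (hd : ∀ (j : Nat) (hj : j < w), dn[j]'(by omega) = df j) :
    ((List.ofFn (fun j : Fin w => (inside.getD y []).getD j.val false)).zip
      (up.zip (dn.zip
        (([false] ++ (List.ofFn (fun j : Fin w => (inside.getD y []).getD j.val false)).take (w-1)).zip
         ((List.ofFn (fun j : Fin w => (inside.getD y []).getD j.val false)).drop 1 ++ [false]))))).map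
      (fun q => q.1 && !(q.2.1 && q.2.2.1 && q.2.2.2.1 && q.2.2.2.2))
    = List.ofFn (fun x : Fin w =>
        (inside.getD y []).getD x.val false &&
          !(uf x.val && df x.val &&
            (if x.val = 0 then false else (inside.getD y []).getD (x.val-1) false) &&
            (if x.val + 1 < w then (inside.getD y []).getD (x.val+1) false else false))) := by
  rw [pv_zip_eq_ofFn (n := w) _ _
      (f := fun j : Fin w => (inside.getD y []).getD j.val false)
      (g := fun j : Fin w => (uf j.val, (df j.val,
        ((if j.val = 0 then false else (inside.getD y []).getD (j.val-1) false),
         (if j.val + 1 < w then (inside.getD y []).getD (j.val+1) false else false)))))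
      (by simp) ?hlen ?hf ?hg]
  · rw [List.map_ofFn]; rfl
  case hlen =>
    simp only [List.length_zip, List.length_append, List.length_cons, List.length_nil,
      List.length_take, List.length_drop, List.length_ofFn]
    omega
  case hf => intro j hj; simp
  case hg =>
    intro j hj
    simp only [List.getElem_zip]
    refine congrArg₂ Prod.mk (hu j hj) (congrArg₂ Prod.mk (hd j hj) (congrArg₂ Prod.mk ?_ ?_))
    · -- left
      rcases j with _ | j
      · rfl
      · have hj' : j < w - 1 := by omega
        simp [List.getElem_cons_succ, List.getElem_take]
    · -- right
      by_cases hjw : j + 1 < w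
      · rw [List.getElem_append_left (by simp; omega)]
        rw [List.getElem_drop]
        simp [hjw, Nat.add_comm]
      · rw [List.getElem_append_right (by simp; omega)]
        simp [hjw]

lemma pv_alt_eq (inside : List (List Bool)) (w : Nat)
    (hww : w = if inside = [] then 0 else (inside.headD []).length)
    (hw : ∀ row ∈ inside, w ≤ row.length) :
    compute_border_mask_alt inside =
      List.ofFn (fun y : Fin inside.length =>
        List.ofFn (fun x : Fin w => pvCellC inside w y.val x.val)) := by
  have hE : compute_border_mask_alt inside =
      ((inside.map fun row => row.take w).zip
        (([List.replicate w false] ++ (inside.map fun row => row.take w).take (inside.length - 1)).zip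
          ((inside.map fun row => row.take w).drop 1 ++ [List.replicate w false]))).map (fun t =>
        (t.1.zip (t.2.1.zip (t.2.2.zip (([false] ++ t.1.take (w-1)).zip (t.1.drop 1 ++ [false]))))).map
          (fun q => q.1 && !(q.2.1 && q.2.2.1 && q.2.2.2.1 && q.2.2.2.2))) := by
    rw [hww]; rfl
  rw [hE]
  have hgd : ∀ (z : Nat) (hz : z < inside.length), inside.getD z [] = inside[z]'hz :=
    fun z hz => List.getD_eq_getElem _ _ hz
  have hlenD : ∀ (z : Nat) (hz : z < inside.length), w ≤ (inside.getD z []).length := by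
    intro z hz; rw [hgd z hz]; exact hw _ (List.getElem_mem hz)
  rw [pv_zip_eq_ofFn (n := inside.length) _ _
      (f := fun y : Fin inside.length => (inside.getD y.val []).take w)
      (g := fun y : Fin inside.length =>
        ((if y.val = 0 then List.replicate w false else (inside.getD (y.val - 1) []).take w),
         (if y.val + 1 < inside.length then (inside.getD (y.val + 1) []).take w
          else List.replicate w false)))
      (by simp) ?hlen ?hf ?hg]
  · rw [List.map_ofFn]
    refine congrArg List.ofFn (funext fun y => ?_)
    simp only [Function.comp]
    rw [pv_row_ofFn inside w hw y.val y.isLt]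
    rw [pv_inner inside w y.val _ _
        (uf := fun x => if y.val = 0 then false else (inside.getD (y.val - 1) []).getD x false)
        (df := fun x => if y.val + 1 < inside.length then (inside.getD (y.val + 1) []).getD x false
               else false)
        ?hulen ?hdlen ?hu ?hd]
    · rfl
    case hulen =>
      split_ifs with h0
      · simp
      · have := hlenD (y.val - 1) (by omega)
        simp only [List.length_take]; omega
    case hdlen =>
      split_ifs with h1
      · have := hlenD (y.val + 1) (by omega)
        simp only [List.length_take]; omega
      · simp
    case hu =>
      intro j hj
      by_cases h0 : y.val = 0
      · simp [h0]
      · have hz : y.val - 1 < inside.length := by omega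
        have hlen2 := hlenD (y.val - 1) hz
        rw [hgd _ hz] at hlen2
        simp only [h0, if_false]
        simp [List.getElem_take, List.getD_eq_getElem?_getD, List.getElem?_eq_getElem hz,
          List.getElem?_eq_getElem (show j < (inside[y.val - 1]'hz).length by omega)]
    case hd =>
      intro j hj
      by_cases h1 : y.val + 1 < inside.length
      · have hlen2 := hlenD (y.val + 1) h1
        rw [hgd _ h1] at hlen2
        simp only [h1, if_true]
        simp [List.getElem_take, List.getD_eq_getElem?_getD, List.getElem?_eq_getElem h1,
          List.getElem?_eq_getElem (show j < (inside[y.val + 1]'h1).length by omega)]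
      · simp [h1]
  case hlen =>
    simp only [List.length_zip, List.length_append, List.length_cons, List.length_nil,
      List.length_take, List.length_drop, List.length_map]
    omega
  case hf =>
    intro j hj
    simp [List.getElem_map, List.getD_eq_getElem?_getD, List.getElem?_eq_getElem hj]
  case hg =>
    intro j hj
    simp only [List.getElem_zip]
    refine congrArg₂ Prod.mk ?_ ?_
    · -- above[j]
      rcases j with _ | j
      · rfl
      · have hj' : j < inside.length - 1 := by omega
        simp only [List.cons_append, List.nil_append, List.getElem_cons_succ, List.getElem_take,
          List.getElem_map]
        simp [List.getD_eq_getElem?_getD, List.getElem?_eq_getElem (show j < inside.length by omega)]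
    · -- below[j]
      by_cases h1 : j + 1 < inside.length
      · rw [List.getElem_append_left (by simp; omega)]
        rw [List.getElem_drop]
        simp [h1, List.getD_eq_getElem?_getD, Nat.add_comm,
          List.getElem?_eq_getElem (show 1 + j < inside.length by omega),
          List.getElem?_eq_getElem (show j + 1 < inside.length by omega)]
      · rw [List.getElem_append_right (by simp; omega)]
        simp [h1]

-- (h+2)x(w+2) False-ringed grid used to analyse port A
def pvPadded (inside : List (List Bool)) (width : Nat) : List (List Bool) :=
  [List.replicate (width + 2) false] ++
    inside.map (fun row => [false] ++ row.take width ++ [false]) ++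
    [List.replicate (width + 2) false]

def pvCell (g : List (List Bool)) (i j : Nat) : Bool := (g.getD i []).getD j false

lemma pvPyCell_natCast (g : List (List Bool)) (y x : Nat) :
    pvPyCell g (y : Int) (x : Int) = (g.getD y []).getD x false := by
  simp [pvPyCell, PySem.List.pyGet?_natCast, List.getD_eq_getElem?_getD]

lemma pvCell_padded (inside : List (List Bool)) (w : Nat)
    (hw : ∀ row ∈ inside, w ≤ row.length) (i j : Nat) :
    pvCell (pvPadded inside w) i j =
      if 1 ≤ i ∧ i ≤ inside.length ∧ 1 ≤ j ∧ j ≤ w then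
        ((inside.getD (i-1) []).getD (j-1) false)
      else false := by
  unfold pvCell pvPadded
  rcases i with _ | i
  · simp [List.getD]
  · rcases Nat.lt_or_ge i inside.length with hi | hi
    · have hrow : ((([List.replicate (w + 2) false] ++
          inside.map (fun row => [false] ++ row.take w ++ [false]) ++
          [List.replicate (w + 2) false])).getD (i+1) []) =
          [false] ++ inside[i].take w ++ [false] := by
        simp [List.getD_eq_getElem?_getD, List.getElem?_append, hi]
      rw [hrow]
      have hlen : (inside[i].take w).length = w := by
        have := hw inside[i] (List.getElem_mem hi)
        simp [List.length_take]; omega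
      rcases j with _ | j
      · rw [if_neg (by omega)]; simp [List.getD]
      · rcases Nat.lt_or_ge j w with hj | hj
        · have e1 : ([false] ++ inside[i].take w ++ [false]).getD (j+1) false
              = (inside[i].take w).getD j false := by
            simp [List.getD_eq_getElem?_getD, List.getElem?_append, hj, hlen]
          have e2 : (inside[i].take w).getD j false = inside[i].getD j false := by
            simp [List.getD_eq_getElem?_getD, hj]
          rw [e1, e2, if_pos (by omega : 1 ≤ i + 1 ∧ i + 1 ≤ inside.length ∧ 1 ≤ j + 1 ∧ j + 1 ≤ w)]
          simp [List.getElem?_eq_getElem hi]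
        · rcases Nat.lt_or_ge (j+1) ([false] ++ inside[i].take w ++ [false]).length with h2 | h2
          · have hjw : j = w := by simp [hlen] at h2; omega
            have e3 : ([false] ++ inside[i].take w ++ [false]).getD (j+1) false = false := by
              rw [hjw]
              simp [List.getD_eq_getElem?_getD, List.getElem?_append, hlen]
            rw [e3, if_neg (by omega)]
          · rw [List.getD_eq_getElem?_getD, List.getElem?_eq_none h2, if_neg (by omega)]
            rfl
    · have hrow : (([List.replicate (w + 2) false] ++
          inside.map (fun row => [false] ++ row.take w ++ [false]) ++
          [List.replicate (w + 2) false])).getD (i+1) [] =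
          if i = inside.length then List.replicate (w+2) false else [] := by
        rcases Nat.eq_or_lt_of_le hi with he | hlt
        · simp [← he, List.getD_eq_getElem?_getD, List.getElem?_append, List.getElem?_eq_none]
        · have hlen2 : ([List.replicate (w + 2) false] ++
             inside.map (fun row => [false] ++ row.take w ++ [false]) ++
             [List.replicate (w + 2) false]).length ≤ i + 1 := by
            simp; omega
          rw [List.getD_eq_getElem?_getD, List.getElem?_eq_none hlen2, if_neg (by omega)]
          rfl
      rw [hrow]
      split_ifs with h1 h2 <;> simp_all <;> omega

-- A's per-cell expression equals the canonical padded-neighbourhood expression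
lemma pv_cell_eq (inside : List (List Bool)) (w y x : Nat)
    (hw : ∀ row ∈ inside, w ≤ row.length) (hy : y < inside.length) (hx : x < w) :
    (if (!pvPyCell inside (y:Int) (x:Int)) = true then false
     else [((0:Int),(-1:Int)), ((1:Int),(0:Int)), ((0:Int),(1:Int)), ((-1:Int),(0:Int))].any
          (fun d =>
            let nx : Int := (x : Int) + d.1
            let ny : Int := (y : Int) + d.2
            decide (nx < 0) || decide (nx ≥ (w : Int)) || decide (ny < 0) ||
              decide (ny ≥ (inside.length : Int)) || !(pvPyCell inside ny nx)))
    = (pvCell (pvPadded inside w) (y+1) (x+1) &&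
        !(pvCell (pvPadded inside w) y (x+1) && pvCell (pvPadded inside w) (y+2) (x+1) &&
          pvCell (pvPadded inside w) (y+1) x && pvCell (pvPadded inside w) (y+1) (x+2))) := by
  have hC : pvCell (pvPadded inside w) (y+1) (x+1) = (inside.getD y []).getD x false := by
    rw [pvCell_padded _ _ hw, if_pos (by omega)]; simp
  simp only [List.any_cons, List.any_nil]
  have hN : (decide ((x:Int) + 0 < 0) || decide ((x:Int) + 0 ≥ (w:Int)) ||
      decide ((y:Int) + -1 < 0) || decide ((y:Int) + -1 ≥ (inside.length:Int)) ||
      !pvPyCell inside ((y:Int) + -1) ((x:Int) + 0)) = !(pvCell (pvPadded inside w) y (x+1)) := by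
    rw [pvCell_padded _ _ hw]
    by_cases h1 : 1 ≤ y
    · rw [if_pos (by omega), show ((y:Int) + -1) = ((y-1:Nat):Int) from by omega,
        show ((x:Int) + 0) = ((x:Nat):Int) from by ring, pvPyCell_natCast]
      simp [show ¬((x:Int) + 0 < 0) from by omega,
        show ¬((x:Int) + 0 ≥ (w:Int)) from by omega,
        show ¬(((y-1:Nat):Int) < 0) from by omega,
        show ¬(((y-1:Nat):Int) ≥ (inside.length:Int)) from by omega]
      intro h; exact absurd h (by omega)
    · rw [if_neg (by omega)]
      simp [show ((y:Int) + -1 < 0) from by omega]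
  have hE : (decide ((x:Int) + 1 < 0) || decide ((x:Int) + 1 ≥ (w:Int)) ||
      decide ((y:Int) + 0 < 0) || decide ((y:Int) + 0 ≥ (inside.length:Int)) ||
      !pvPyCell inside ((y:Int) + 0) ((x:Int) + 1)) = !(pvCell (pvPadded inside w) (y+1) (x+2)) := by
    rw [pvCell_padded _ _ hw]
    by_cases h1 : x+2 ≤ w
    · rw [if_pos (by omega), show ((x:Int) + 1) = ((x+1:Nat):Int) from by omega,
        show ((y:Int) + 0) = ((y:Nat):Int) from by ring, pvPyCell_natCast]
      simp [show ¬(((x+1:Nat):Int) < 0) from by omega,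
        show ¬(((x+1:Nat):Int) ≥ (w:Int)) from by omega,
        show ¬((y:Int) + 0 < 0) from by omega,
        show ¬((y:Int) + 0 ≥ (inside.length:Int)) from by omega]
      intro h; exact absurd h (by omega)
    · rw [if_neg (by omega)]
      simp [show ((x:Int) + 1 ≥ (w:Int)) from by omega]
  have hS : (decide ((x:Int) + 0 < 0) || decide ((x:Int) + 0 ≥ (w:Int)) ||
      decide ((y:Int) + 1 < 0) || decide ((y:Int) + 1 ≥ (inside.length:Int)) ||
      !pvPyCell inside ((y:Int) + 1) ((x:Int) + 0)) = !(pvCell (pvPadded inside w) (y+2) (x+1)) := by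
    rw [pvCell_padded _ _ hw]
    by_cases h1 : y+2 ≤ inside.length
    · rw [if_pos (by omega), show ((y:Int) + 1) = ((y+1:Nat):Int) from by omega,
        show ((x:Int) + 0) = ((x:Nat):Int) from by ring, pvPyCell_natCast]
      simp [show ¬((x:Int) + 0 < 0) from by omega,
        show ¬((x:Int) + 0 ≥ (w:Int)) from by omega,
        show ¬(((y+1:Nat):Int) < 0) from by omega,
        show ¬(((y+1:Nat):Int) ≥ (inside.length:Int)) from by omega]
      intro h; exact absurd h (by omega)
    · rw [if_neg (by omega)]
      simp [show ((y:Int) + 1 ≥ (inside.length:Int)) from by omega]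
  have hW : (decide ((x:Int) + -1 < 0) || decide ((x:Int) + -1 ≥ (w:Int)) ||
      decide ((y:Int) + 0 < 0) || decide ((y:Int) + 0 ≥ (inside.length:Int)) ||
      !pvPyCell inside ((y:Int) + 0) ((x:Int) + -1)) = !(pvCell (pvPadded inside w) (y+1) x) := by
    rw [pvCell_padded _ _ hw]
    by_cases h1 : 1 ≤ x
    · rw [if_pos (by omega), show ((x:Int) + -1) = ((x-1:Nat):Int) from by omega,
        show ((y:Int) + 0) = ((y:Nat):Int) from by ring, pvPyCell_natCast]
      simp [show ¬(((x-1:Nat):Int) < 0) from by omega,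
        show ¬(((x-1:Nat):Int) ≥ (w:Int)) from by omega,
        show ¬((y:Int) + 0 < 0) from by omega,
        show ¬((y:Int) + 0 ≥ (inside.length:Int)) from by omega]
      intro h; exact absurd h (by omega)
    · rw [if_neg (by omega)]
      simp [show ((x:Int) + -1 < 0) from by omega]
  rw [hN, hE, hS, hW, pvPyCell_natCast, hC]
  generalize (inside.getD y []).getD x false = c
  generalize pvCell (pvPadded inside w) y (x+1) = n
  generalize pvCell (pvPadded inside w) (y+2) (x+1) = s
  generalize pvCell (pvPadded inside w) (y+1) x = wl
  generalize pvCell (pvPadded inside w) (y+1) (x+2) = e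
  cases c <;> cases n <;> cases s <;> cases wl <;> cases e <;> rfl

-- A's padded-neighbourhood cell equals the canonical cell
lemma pv_cellC_padded (inside : List (List Bool)) (w y x : Nat)
    (hw : ∀ row ∈ inside, w ≤ row.length) (hy : y < inside.length) (hx : x < w) :
    (pvCell (pvPadded inside w) (y+1) (x+1) &&
      !(pvCell (pvPadded inside w) y (x+1) && pvCell (pvPadded inside w) (y+2) (x+1) &&
        pvCell (pvPadded inside w) (y+1) x && pvCell (pvPadded inside w) (y+1) (x+2)))
    = pvCellC inside w y x := by
  have e0 : pvCell (pvPadded inside w) (y+1) (x+1) = (inside.getD y []).getD x false := by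
    rw [pvCell_padded _ _ hw, if_pos (by omega)]; simp
  have e1 : pvCell (pvPadded inside w) y (x+1) =
      (if y = 0 then false else (inside.getD (y-1) []).getD x false) := by
    rw [pvCell_padded _ _ hw]
    rcases y with _ | k
    · rw [if_neg (by omega)]; rfl
    · rw [if_pos (by omega), if_neg (by omega)]; simp
  have e2 : pvCell (pvPadded inside w) (y+2) (x+1) =
      (if y + 1 < inside.length then (inside.getD (y+1) []).getD x false else false) := by
    rw [pvCell_padded _ _ hw]
    by_cases h1 : y + 1 < inside.length
    · rw [if_pos (by omega), if_pos h1]; simp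
    · rw [if_neg (by omega), if_neg h1]
  have e3 : pvCell (pvPadded inside w) (y+1) x =
      (if x = 0 then false else (inside.getD y []).getD (x-1) false) := by
    rw [pvCell_padded _ _ hw]
    rcases x with _ | k
    · rw [if_neg (by omega)]; rfl
    · rw [if_pos (by omega), if_neg (by omega)]; simp
  have e4 : pvCell (pvPadded inside w) (y+1) (x+2) =
      (if x + 1 < w then (inside.getD y []).getD (x+1) false else false) := by
    rw [pvCell_padded _ _ hw]
    by_cases h1 : x + 1 < w
    · rw [if_pos (by omega), if_pos h1]; simp
    · rw [if_neg (by omega), if_neg h1]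
  rw [e0, e1, e2, e3, e4, pvCellC]

-- ===== VERDICT (by name: the statement is the Claim_ definition above) =====
theorem compute_border_mask_spec : Claim_equal_compute_border_mask := by
  intro inside _ hpre
  unfold Spec_compute_border_mask
  have hw : ∀ row ∈ inside, (if inside = [] then 0 else (inside.headD []).length) ≤ row.length := by
    intro row hr
    have hne : inside ≠ [] := by rintro rfl; simp at hr
    simpa [hne] using hpre row hr
  rw [pv_alt_eq inside _ rfl hw]
  unfold compute_border_mask
  simp only []
  apply List.ext_getElem
  · simp
  intro y hy1 hy2
  have hy : y < inside.length := by simpa using hy1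
  rw [List.getElem_map, List.getElem_range, List.getElem_ofFn]
  apply List.ext_getElem
  · simp
  intro x hx1 hx2
  have hx : x < (if inside = [] then 0 else (inside.headD []).length) := by simpa using hx1
  rw [List.getElem_map, List.getElem_range, List.getElem_ofFn]
  rw [pv_cell_eq inside _ y x hw hy hx]
  exact pv_cellC_padded inside _ y x hw hy hx
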